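-- pv_equiv track=rewrite | github.com/0-317/latin_phonetics_tool | project/hexingongneng.py | syllabify_word
-- ===== SOURCE A (Python) =====
-- CONSONANT_GROUPS = [
--     "bl", "br", "pl", "pr", "dr", "tr", "cl", "cr", "fr", "fl", "gr", "gl",
--     "sp", "st", "sc", "ch", "ph", "th", "qu"
-- ]
--
-- STOP_LIQUID = ['pr', 'tr', 'cr', 'br', 'dr', 'fr', 'gr', 'pl', 'cl', 'bl', 'fl', 'gl']
--
-- def syllabify_word(word_sounds: list) -> list:
--     """
--     Делит слово (представленное списком звуков из функции sounder) на слоги.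
--     Основные правила:
--     1. Одна согласная между гласными идет в следующий слог
--     2. Две согласные разделяются (кроме групп согласных и stop+liquid)
--     3. Группы согласных целиком переходят в следующий слог
--     """
--     if not word_sounds:
--         return []
--
--     # Найти индексы всех гласных
--     vowel_indices = [idx for idx, (t, c) in enumerate(word_sounds) if t == 'v']
--     if not vowel_indices:
--         return []
--
--     syllables = []
--     total_vowels = len(vowel_indices)
--     last_end_idx = 0
--
--     for i in range(total_vowels):
--         curr_vowel_idx = vowel_indices[i]
--         start_idx = last_end_idx
--
--         # Последний слог - берем все оставшиеся звуки
--         if i == total_vowels - 1: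
--             end_idx = len(word_sounds)
--         else:
--             next_vowel_idx = vowel_indices[i+1]
--             # Согласные между текущей и следующей гласной
--             consonants_between = word_sounds[curr_vowel_idx + 1 : next_vowel_idx]
--             consonant_count = len(consonants_between)
--
--             # Проверка на группу согласных
--             consonant_str = ''.join([c for t, c in consonants_between]).lower()
--             is_consonant_group = consonant_str in CONSONANT_GROUPS or consonant_str in STOP_LIQUID
--
--             if is_consonant_group or consonant_count <= 1:
--                 # Группа согласных или 1 согласная - все в следующий слог
--                 end_idx = curr_vowel_idx + 1
--             else:
--                 # Две согласные - разделяем (первая в текущий, вторая в следующий)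
--                 end_idx = curr_vowel_idx + 2
--
--         last_end_idx = end_idx
--         # Формируем слог
--         current_syllable = word_sounds[start_idx:end_idx]
--         if current_syllable:
--             syllables.append(current_syllable)
--
--     return syllables
-- ===== SOURCE B (Python) =====
-- CONSONANT_GROUPS = [
--     "bl", "br", "pl", "pr", "dr", "tr", "cl", "cr", "fr", "fl", "gr", "gl",
--     "sp", "st", "sc", "ch", "ph", "th", "qu"
-- ]
--
-- STOP_LIQUID = ['pr', 'tr', 'cr', 'br', 'dr', 'fr', 'gr', 'pl', 'cl', 'bl', 'fl', 'gl']
--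
--
-- def syllabify_word(word_sounds: list) -> list:
--     """Consume the word front-to-back: repeatedly slice off the first syllable
--     of the remaining suffix, recomputing vowel positions locally."""
--     if not any(t == 'v' for t, _ in word_sounds):
--         return []
--     syllables = []
--     rest = word_sounds
--     while True:
--         # first vowel of the remaining suffix
--         v0 = next(i for i, (t, _) in enumerate(rest) if t == 'v')
--         # next vowel after it, if any (relative to position v0+1)
--         v1rel = next((i for i, (t, _) in enumerate(rest[v0 + 1:]) if t == 'v'), None)
--         if v1rel is None:
--             syllables.append(rest)
--             return syllables
--         cluster = rest[v0 + 1:v0 + 1 + v1rel]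
--         s = ''.join(c for _, c in cluster).lower()
--         cut = v0 + 1 if (s in CONSONANT_GROUPS or s in STOP_LIQUID or len(cluster) <= 1) else v0 + 2
--         syllables.append(rest[:cut])
--         rest = rest[cut:]
-- ===== Notes on version B (the rewrite author's own statement) =====
-- stated objective: alternative
-- what changed: B drops A's precomputed global vowel-index table and index-based for-loop entirely: it consumes the word front-to-back, each pass locating the next vowel locally in the remaining suffix, slicing off the first syllable and continuing on the rest of the list.
import Mathlib
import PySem

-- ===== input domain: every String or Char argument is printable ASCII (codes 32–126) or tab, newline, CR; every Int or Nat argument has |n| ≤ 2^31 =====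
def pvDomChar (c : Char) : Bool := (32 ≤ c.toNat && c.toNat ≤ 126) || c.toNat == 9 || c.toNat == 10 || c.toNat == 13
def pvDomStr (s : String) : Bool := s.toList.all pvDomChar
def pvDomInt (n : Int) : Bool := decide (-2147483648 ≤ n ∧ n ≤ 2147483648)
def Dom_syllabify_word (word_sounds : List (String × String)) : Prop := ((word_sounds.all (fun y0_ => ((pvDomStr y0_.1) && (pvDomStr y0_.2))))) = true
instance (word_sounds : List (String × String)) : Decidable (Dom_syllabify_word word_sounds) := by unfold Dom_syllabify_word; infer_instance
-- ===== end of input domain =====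

-- B abandons A's global vowel-index table and index loop: it consumes the word front-to-back,
-- repeatedly slicing the first syllable off the remaining suffix (alternative decomposition, same cost).

-- ===== PORT A =====
def CONSONANT_GROUPS : List String :=
  ["bl", "br", "pl", "pr", "dr", "tr", "cl", "cr", "fr", "fl", "gr", "gl",
   "sp", "st", "sc", "ch", "ph", "th", "qu"]

def STOP_LIQUID : List String :=
  ["pr", "tr", "cr", "br", "dr", "fr", "gr", "pl", "cl", "bl", "fl", "gl"]

-- the body of A's 'for i in range(total_vowels)' loop, on state (last_end_idx, syllables)
def stepA (word_sounds : List (String × String)) (vowel_indices : List Int) (total_vowels : Int)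
    (st : Int × List (List (String × String))) (i : Int) : Int × List (List (String × String)) :=
  let curr_vowel_idx := PySem.List.pyGetD vowel_indices i 0
  let start_idx := st.1
  let end_idx :=
    if i == total_vowels - 1 then PySem.List.len word_sounds
    else
      let next_vowel_idx := PySem.List.pyGetD vowel_indices (i + 1) 0
      let consonants_between :=
        PySem.List.slice word_sounds (some (curr_vowel_idx + 1)) (some next_vowel_idx)
      let consonant_count := PySem.List.len consonants_between
      let consonant_str :=
        PySem.Str.lower (PySem.Str.join "" (consonants_between.map (·.2)))
      let is_consonant_group :=
        CONSONANT_GROUPS.contains consonant_str || STOP_LIQUID.contains consonant_str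
      if is_consonant_group || consonant_count ≤ 1 then curr_vowel_idx + 1
      else curr_vowel_idx + 2
  let current_syllable := PySem.List.slice word_sounds (some start_idx) (some end_idx)
  (end_idx, if current_syllable = [] then st.2 else st.2 ++ [current_syllable])

def syllabify_word (word_sounds : List (String × String)) : List (List (String × String)) :=
  if word_sounds = [] then []
  else
    let vowel_indices : List Int :=
      ((PySem.List.enumerate word_sounds 0).filter (fun p => p.2.1 == "v")).map (·.1)
    if vowel_indices = [] then []
    else
      let total_vowels : Int := PySem.List.len vowel_indices
      ((PySem.List.pyRange 0 total_vowels 1).foldl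
        (stepA word_sounds vowel_indices total_vowels)
        ((0 : Int), ([] : List (List (String × String))))).2

-- ===== PORT B =====
-- B's while loop, as the obvious structural recursion on the remaining suffix
-- (each pass slices off the first syllable and continues on 'rest[cut:]').
def bLoop (rest : List (String × String)) : List (List (String × String)) :=
  match h0 : rest.findIdx? (fun p => p.1 == "v") with
  | none => []          -- unreachable: bLoop is only entered when a vowel is present
  | some v0 =>
    match (rest.drop (v0 + 1)).findIdx? (fun p => p.1 == "v") with
    | none => [rest]
    | some v1rel =>
      let cluster := (rest.drop (v0 + 1)).take v1rel   -- rest[v0+1 : v0+1+v1rel]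
      let s := PySem.Str.lower (PySem.Str.join "" (cluster.map (·.2)))
      let cut := if (CONSONANT_GROUPS.contains s || STOP_LIQUID.contains s) || cluster.length ≤ 1
                 then v0 + 1 else v0 + 2
      rest.take cut :: bLoop (rest.drop cut)
termination_by rest.length
decreasing_by
  have hlt := (List.findIdx?_eq_some_iff_findIdx_eq.mp h0).1
  simp only [List.length_drop]
  split <;> omega

def syllabify_word_alt (word_sounds : List (String × String)) : List (List (String × String)) :=
  if word_sounds.any (fun p => p.1 == "v") then bLoop word_sounds else []

-- ===== PRECONDITION & SPEC =====
def Spec_syllabify_word (word_sounds : List (String × String)) (out : List (List (String × String))) : Prop := out = syllabify_word_alt word_sounds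
instance (word_sounds : List (String × String)) (out : List (List (String × String))) : Decidable (Spec_syllabify_word word_sounds out) := by unfold Spec_syllabify_word; infer_instance

-- ===== CLAIM (what is proved, stated in full; the proofs are below) =====
def Claim_equal_syllabify_word : Prop := ∀ (word_sounds : List (String × String)), Dom_syllabify_word word_sounds → Spec_syllabify_word word_sounds (syllabify_word word_sounds)

-- ===== LEMMAS AND PROOFS =====

-- A's cut decision between two adjacent vowel positions, extracted for the proof layer
def cut_ (word_sounds : List (String × String)) (curr nxt : Int) : Int :=
  let between := PySem.List.slice word_sounds (some (curr + 1)) (some nxt)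
  let s := PySem.Str.lower (PySem.Str.join "" (between.map (·.2)))
  if (CONSONANT_GROUPS.contains s || STOP_LIQUID.contains s) || PySem.List.len between ≤ 1
  then curr + 1 else curr + 2

-- recursive description of A's loop, indexed by the (global) vowel-index list
def loopA (ws : List (String × String)) : Int → List (List (String × String)) → List Int → List (List (String × String))
  | _, acc, [] => acc
  | last, acc, [_] =>
      let s := PySem.List.slice ws (some last) (some (PySem.List.len ws))
      acc ++ (if s = [] then [] else [s])
  | last, acc, (v1 :: v2 :: rest) =>
      let e := cut_ ws v1 v2
      let s := PySem.List.slice ws (some last) (some e)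
      loopA ws e (acc ++ (if s = [] then [] else [s])) (v2 :: rest)

theorem loopA_acc (ws : List (String × String)) (suf : List Int) :
    ∀ (last : Int) (acc : List (List (String × String))),
      loopA ws last acc suf = acc ++ loopA ws last [] suf := by
  induction suf with
  | nil => intro last acc; simp [loopA]
  | cons v rest ih =>
    intro last acc
    cases rest with
    | nil => simp [loopA]
    | cons v2 rest' =>
      simp only [loopA]
      rw [ih, ih (cut_ ws v v2) ([] ++ _)]
      simp [List.append_assoc]

theorem foldA_eq_loopA (ws : List (String × String)) (suf : List Int) :
    ∀ (pre : List Int) (last : Int) (acc : List (List (String × String))), suf ≠ [] →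
      ((PySem.List.pyRange (pre.length : Int) (PySem.List.len (pre ++ suf)) 1).foldl
        (stepA ws (pre ++ suf) (PySem.List.len (pre ++ suf))) (last, acc)).2
      = loopA ws last acc suf := by
  induction suf with
  | nil => intro _ _ _ h; exact absurd rfl h
  | cons v rest ih =>
    intro pre last acc _
    have hlen : PySem.List.len (pre ++ v :: rest) = ((pre.length + rest.length + 1 : Nat) : Int) := by
      simp [PySem.List.len_eq]; ring
    have hcons : PySem.List.pyRange (pre.length : Int) (PySem.List.len (pre ++ v :: rest)) 1
        = (pre.length : Int) :: PySem.List.pyRange ((pre.length : Int) + 1) (PySem.List.len (pre ++ v :: rest)) 1 := by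
      apply PySem.List.pyRange_one_cons
      rw [hlen]; omega
    rw [hcons, List.foldl_cons]
    have hget : PySem.List.pyGetD (pre ++ v :: rest) ((pre.length : Nat) : Int) 0 = v := by
      rw [PySem.List.pyGetD_natCast]
      simp [List.getD]
    cases rest with
    | nil =>
      have hlast : ((pre.length : Int) == PySem.List.len (pre ++ [v]) - 1) = true := by
        rw [hlen]; simp
      have hnil : PySem.List.pyRange ((pre.length : Int) + 1) (PySem.List.len (pre ++ [v])) 1 = [] := by
        apply PySem.List.pyRange_one_eq_nil
        rw [hlen]; simp only [List.length_nil]; push_cast; omega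
      rw [hnil, List.foldl_nil]
      simp only [stepA, hlast, if_true, loopA]
      by_cases hs : PySem.List.slice ws (some last) (some ((ws.length : Int))) = [] <;>
        simp [hs]
    | cons v2 rest' =>
      have hlast : ((pre.length : Int) == PySem.List.len (pre ++ v :: v2 :: rest') - 1) = false := by
        rw [hlen]; simp; omega
      have hget2 : PySem.List.pyGetD (pre ++ v :: v2 :: rest') ((pre.length : Int) + 1) 0 = v2 := by
        have h0 : ((pre.length : Int) + 1) = ((pre.length + 1 : Nat) : Int) := by push_cast; ring
        rw [h0, PySem.List.pyGetD_natCast]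
        have h1 : pre ++ v :: v2 :: rest' = (pre ++ [v]) ++ v2 :: rest' := by simp
        have h2 : pre.length + 1 = (pre ++ [v]).length := by simp
        rw [h1, h2]
        simp [List.getD]
      have hstep : stepA ws (pre ++ v :: v2 :: rest') (PySem.List.len (pre ++ v :: v2 :: rest')) (last, acc) ((pre.length : Nat) : Int)
          = (cut_ ws v v2,
             if PySem.List.slice ws (some last) (some (cut_ ws v v2)) = [] then acc
             else acc ++ [PySem.List.slice ws (some last) (some (cut_ ws v v2))]) := by
        simp only [stepA, hlast, Bool.false_eq_true, if_false, hget, hget2, cut_]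
      rw [hstep]
      have hre : pre ++ v :: v2 :: rest' = (pre ++ [v]) ++ v2 :: rest' := by simp
      have hlen2 : ((pre.length : Int) + 1) = (((pre ++ [v]).length : Nat) : Int) := by
        simp
      rw [hre, hlen2, ih (pre ++ [v]) _ _ (by simp)]
      simp only [loopA]
      have hI : (if PySem.List.slice ws (some last) (some (cut_ ws v v2)) = [] then acc
                 else acc ++ [PySem.List.slice ws (some last) (some (cut_ ws v v2))])
          = acc ++ (if PySem.List.slice ws (some last) (some (cut_ ws v v2)) = [] then []
                    else [PySem.List.slice ws (some last) (some (cut_ ws v v2))]) := by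
        by_cases hs : PySem.List.slice ws (some last) (some (cut_ ws v v2)) = [] <;> simp [hs]
      rw [hI]

-- vowel positions of a sound list, as a recursively defined Nat list (proof-layer tool)
def vIdx : List (String × String) → List Nat
  | [] => []
  | x :: xs => (if x.1 == "v" then [0] else []) ++ (vIdx xs).map (· + 1)

theorem vIdx_enumerate (l : List (String × String)) :
    ∀ s : Int, ((PySem.List.enumerate l s).filter (fun p => p.2.1 == "v")).map (·.1)
      = (vIdx l).map (fun (i : Nat) => s + (i : Int)) := by
  induction l with
  | nil => intro s; simp [vIdx, PySem.List.enumerate]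
  | cons x xs ih =>
    intro s
    rw [PySem.List.enumerate_cons]
    by_cases hx : x.1 == "v"
    · simp only [vIdx, hx, List.filter_cons, if_pos, List.singleton_append, List.map_cons]
      rw [ih (s + 1), List.map_map]
      congr 1
      · simp
      · apply List.map_congr_left; intro a _
        simp only [Function.comp_apply]; push_cast; ring
    · have hx' : (x.1 == "v") = false := by simpa using hx
      simp only [vIdx, hx', List.filter_cons, Bool.false_eq_true, reduceIte, List.nil_append]
      rw [ih (s + 1), List.map_map]
      apply List.map_congr_left; intro a _
      simp only [Function.comp_apply]; push_cast; ring

theorem vIdx_eq_nil_iff (l : List (String × String)) :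
    vIdx l = [] ↔ l.any (fun p => p.1 == "v") = false := by
  induction l with
  | nil => simp [vIdx]
  | cons x xs ih =>
    by_cases hx : x.1 == "v" <;> simp [vIdx, hx, ih]

theorem vIdx_lt_length (l : List (String × String)) : ∀ v ∈ vIdx l, v < l.length := by
  induction l with
  | nil => simp [vIdx]
  | cons x xs ih =>
    intro v hv
    simp only [vIdx, List.mem_append, List.mem_map] at hv
    rcases hv with hv | ⟨w, hw, rfl⟩
    · have hv0 : v = 0 := by split at hv <;> simp_all
      simp [hv0]
    · have := ih w hw; simp; omega

theorem vIdx_pairwise (l : List (String × String)) : List.Pairwise (· < ·) (vIdx l) := by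
  induction l with
  | nil => simp [vIdx]
  | cons x xs ih =>
    have hmap : List.Pairwise (· < ·) ((vIdx xs).map (· + 1)) := by
      apply List.Pairwise.map _ _ ih
      intro a b h; omega
    by_cases hx : x.1 == "v"
    · simp only [vIdx, hx, if_pos, List.singleton_append]
      refine List.pairwise_cons.mpr ⟨?_, hmap⟩
      intro b hb
      simp only [List.mem_map] at hb
      obtain ⟨w, _, rfl⟩ := hb; omega
    · simpa [vIdx, hx] using hmap

theorem vIdx_drop (l : List (String × String)) :
    ∀ m : Nat, vIdx (l.drop m) = ((vIdx l).filter (fun v => decide (m ≤ v))).map (· - m) := by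
  induction l with
  | nil => intro m; simp [vIdx]
  | cons x xs ih =>
    intro m
    cases m with
    | zero =>
      simp only [List.drop_zero]
      have h1 : (vIdx (x :: xs)).filter (fun v => decide (0 ≤ v)) = vIdx (x :: xs) := by
        apply List.filter_eq_self.mpr; intro a _; simp
      rw [h1]
      have h2 : (vIdx (x :: xs)).map (· - 0) = (vIdx (x :: xs)).map id := by
        apply List.map_congr_left; intro a _; simp
      rw [h2, List.map_id]
    | succ m' =>
      simp only [List.drop_succ_cons, ih m', vIdx, List.filter_append, List.map_append]
      have h0 : (if x.1 == "v" then [0] else []).filter (fun v => decide (m' + 1 ≤ v)) = [] := by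
        split
        · simp
        · rfl
      rw [h0, List.map_nil, List.nil_append, List.filter_map, List.map_map]
      have hp : ((fun v => decide (m' + 1 ≤ v)) ∘ (· + 1)) = (fun v => decide (m' ≤ v)) := by
        funext a; simp
      rw [hp]
      apply List.map_congr_left; intro a _; simp

theorem vIdx_head_findIdx (l : List (String × String)) :
    l.findIdx? (fun p => p.1 == "v") = (vIdx l).head? := by
  induction l with
  | nil => simp [vIdx]
  | cons x xs ih =>
    rw [List.findIdx?_cons]
    by_cases hx : x.1 == "v"
    · simp [vIdx, hx]
    · simp only [vIdx, hx, Bool.false_eq_true, reduceIte, List.nil_append, ih]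
      cases vIdx xs <;> simp

-- main bridge: B's suffix recursion computes A's loop on the global vowel-index list
theorem bLoop_eq_loopA (ws : List (String × String)) :
    ∀ (suf : List Nat) (k : Nat),
      vIdx (ws.drop k) = suf.map (· - k) →
      (∀ v ∈ suf, k ≤ v) →
      List.Pairwise (· < ·) suf →
      bLoop (ws.drop k) = loopA ws (k : Int) [] (suf.map (fun (i : Nat) => (i : Int))) := by
  intro suf
  induction suf with
  | nil =>
    intro k hv _ _
    have hf : (ws.drop k).findIdx? (fun p => p.1 == "v") = none := by
      rw [vIdx_head_findIdx, hv]; rfl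
    rw [bLoop.eq_def]
    split
    · simp [loopA]
    · rename_i v0 h0; rw [hf] at h0; exact absurd h0 (by simp)
  | cons v1 tail ih =>
    intro k hv hk hp
    have hne : ws.drop k ≠ [] := by
      intro h; rw [h] at hv; simp [vIdx] at hv
    have hf : (ws.drop k).findIdx? (fun p => p.1 == "v") = some (v1 - k) := by
      rw [vIdx_head_findIdx, hv]; rfl
    rw [bLoop.eq_def]
    split
    · rename_i h0; rw [hf] at h0; exact absurd h0 (by simp)
    rename_i v0 h0
    rw [hf] at h0
    have hv0 : v0 = v1 - k := by injection h0; omega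
    subst hv0
    cases tail with
    | nil =>
      have h2 : vIdx ((ws.drop k).drop (v1 - k + 1)) = [] := by
        rw [vIdx_drop, hv]
        have : decide (v1 - k + 1 ≤ v1 - k) = false := by simp
        simp [List.filter_cons, this]
      have hf2 : ((ws.drop k).drop (v1 - k + 1)).findIdx? (fun p => p.1 == "v") = none := by
        rw [vIdx_head_findIdx, h2]; rfl
      split
      · -- second search found nothing: last syllable is the whole suffix
        have hs : PySem.List.slice ws (some ((k : Nat) : Int)) (some (PySem.List.len ws)) = ws.drop k := by
          rw [PySem.List.len_eq, PySem.List.slice_natCast]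
          exact List.take_of_length_le (by simp)
        simp only [loopA, List.map_cons, List.map_nil, hs, if_neg hne]
        simp
      · rename_i v1rel h1; rw [hf2] at h1; exact absurd h1 (by simp)
    | cons v2 rest' =>
      have hk1 : k ≤ v1 := hk v1 (by simp)
      have hk2 : k ≤ v2 := hk v2 (by simp)
      have h12 : v1 < v2 := (List.pairwise_cons.mp hp).1 v2 (by simp)
      have hptail := (List.pairwise_cons.mp hp).2
      have htail : ∀ w ∈ rest', v2 < w := (List.pairwise_cons.mp hptail).1
      have hv2mem : v2 - k ∈ vIdx (ws.drop k) := by rw [hv]; simp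
      have hlen2 : v2 < ws.length := by
        have := vIdx_lt_length _ _ hv2mem
        simp only [List.length_drop] at this
        omega
      have hdd : (ws.drop k).drop (v1 - k + 1) = ws.drop (v1 + 1) := by
        rw [List.drop_drop]; congr 1; omega
      have hfilter : (vIdx (ws.drop k)).filter (fun v => decide (v1 - k + 1 ≤ v))
          = (v2 - k) :: rest'.map (· - k) := by
        rw [hv]
        simp only [List.map_cons, List.filter_cons]
        have c1 : decide (v1 - k + 1 ≤ v1 - k) = false := by simp
        have c2 : decide (v1 - k + 1 ≤ v2 - k) = true := by simp; omega
        simp only [c1, c2, Bool.false_eq_true, if_false, if_true, reduceIte]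
        congr 1
        apply List.filter_eq_self.mpr
        intro w hw
        obtain ⟨w', hw', rfl⟩ := List.mem_map.mp hw
        have := htail w' hw'
        simp; omega
      have h2 : vIdx (ws.drop (v1 + 1)) = (v2 - (v1 + 1)) :: rest'.map (· - (v1 + 1)) := by
        rw [← hdd, vIdx_drop, hfilter]
        simp only [List.map_cons, List.map_map]
        congr 1
        · omega
        · apply List.map_congr_left; intro w hw
          have := htail w hw
          simp only [Function.comp_apply]; omega
      have hf2 : (ws.drop (v1 + 1)).findIdx? (fun p => p.1 == "v") = some (v2 - (v1 + 1)) := by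
        rw [vIdx_head_findIdx, h2]; rfl
      -- recursive call equals A's loop at any new start n between the two vowels
      have hrec : ∀ n : Nat, v1 < n → n ≤ v2 →
          bLoop ((ws.drop k).drop (n - k)) = loopA ws (n : Int) []
            ((v2 :: rest').map (fun (i : Nat) => (i : Int))) := by
        intro n h1n h2n
        have hdn : (ws.drop k).drop (n - k) = ws.drop n := by
          rw [List.drop_drop]; congr 1; omega
        rw [hdn]
        have hveq : vIdx (ws.drop n) = (v2 :: rest').map (· - n) := by
          rw [← hdn, vIdx_drop, hv]
          simp only [List.map_cons, List.filter_cons, List.map_map]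
          have c1 : decide (n - k ≤ v1 - k) = false := by simp; omega
          have c2 : decide (n - k ≤ v2 - k) = true := by simp; omega
          simp only [c1, c2, Bool.false_eq_true, if_false, if_true, reduceIte]
          have hfr : (rest'.map (· - k)).filter (fun v => decide (n - k ≤ v)) = rest'.map (· - k) := by
            apply List.filter_eq_self.mpr
            intro w hw
            obtain ⟨w', hw', rfl⟩ := List.mem_map.mp hw
            have := htail w' hw'
            simp; omega
          rw [hfr]
          simp only [List.map_cons, List.map_map]
          congr 1
          · omega
          · apply List.map_congr_left; intro w hw
            have := htail w hw
            simp only [Function.comp_apply]; omega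
        exact ih n hveq
          (by intro w hw; rcases List.mem_cons.mp hw with rfl | hw
              · omega
              · have := htail w hw; omega)
          hptail
      split
      · rename_i h1; rw [hdd, hf2] at h1; exact absurd h1 (by simp)
      rename_i v1rel h1
      rw [hdd, hf2] at h1
      have hrel : v1rel = v2 - (v1 + 1) := by injection h1; omega
      subst hrel
      -- both programs see the same consonant cluster
      rw [hdd]
      have hbet : PySem.List.slice ws (some (((v1 : Nat) : Int) + 1)) (some ((v2 : Nat) : Int))
          = (ws.drop (v1 + 1)).take (v2 - (v1 + 1)) := by
        have hcast : ((v1 : Nat) : Int) + 1 = (((v1 + 1 : Nat)) : Int) := by push_cast; ring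
        rw [hcast, PySem.List.slice_natCast]
      have hclen : ((ws.drop (v1 + 1)).take (v2 - (v1 + 1))).length = v2 - (v1 + 1) := by
        simp only [List.length_take, List.length_drop]; omega
      -- the syllable slice and the final assembly, by cases on the shared cut decision
      have hs1 : ∀ n : Nat, k < n → PySem.List.slice ws (some ((k : Nat) : Int)) (some ((n : Nat) : Int))
          = (ws.drop k).take (n - k) := by
        intro n _; rw [PySem.List.slice_natCast]
      have hsne : ∀ n : Nat, k < n → (ws.drop k).take (n - k) ≠ [] := by
        intro n hn h
        rcases List.take_eq_nil_iff.mp h with h' | h'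
        · omega
        · exact hne h'
      simp only [loopA, List.map_cons, cut_, hbet, PySem.List.len_eq, hclen]
      have hd : (decide (((v2 - (v1 + 1) : Nat) : Int) ≤ 1)) = decide (v2 - (v1 + 1) ≤ 1) := by
        simp
      rw [hd]
      split
      next hq =>
        have hcast1 : ((v1 : Nat) : Int) + 1 = (((v1 + 1 : Nat)) : Int) := by push_cast; ring
        rw [hcast1, hs1 (v1 + 1) (by omega), if_neg (hsne (v1 + 1) (by omega)), loopA_acc]
        have he : v1 - k + 1 = v1 + 1 - k := by omega
        rw [he, hrec (v1 + 1) (by omega) (by omega)]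
        simp
      next hq =>
        have hge : v1 + 3 ≤ v2 := by
          by_contra hcon
          apply hq
          have h1 : v2 - (v1 + 1) ≤ 1 := by omega
          simp [h1]
        have hcast2 : ((v1 : Nat) : Int) + 2 = (((v1 + 2 : Nat)) : Int) := by push_cast; ring
        rw [hcast2, hs1 (v1 + 2) (by omega), if_neg (hsne (v1 + 2) (by omega)), loopA_acc]
        have he : v1 - k + 2 = v1 + 2 - k := by omega
        rw [he, hrec (v1 + 2) (by omega) (by omega)]
        simp

-- ===== VERDICT (by name: the statement is the Claim_ definition above) =====
theorem syllabify_word_spec : Claim_equal_syllabify_word := by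
  intro ws _
  unfold Spec_syllabify_word syllabify_word syllabify_word_alt
  by_cases hany : ws.any (fun p => p.1 == "v") = true
  · have hws : ws ≠ [] := by
      intro h; rw [h] at hany; simp at hany
    have hvI : vIdx ws ≠ [] := by
      intro h
      rw [(vIdx_eq_nil_iff ws).mp h] at hany
      exact Bool.false_ne_true hany
    have hvs : ((PySem.List.enumerate ws 0).filter (fun p => p.2.1 == "v")).map (·.1)
        = (vIdx ws).map (fun (i : Nat) => (i : Int)) := by
      rw [vIdx_enumerate ws 0]
      apply List.map_congr_left; intro a _; ring
    have hvs_ne : ((PySem.List.enumerate ws 0).filter (fun p => p.2.1 == "v")).map (·.1) ≠ [] := by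
      rw [hvs]; simpa using hvI
    rw [if_neg hws, if_pos hany, if_neg hvs_ne, hvs]
    have hA := foldA_eq_loopA ws ((vIdx ws).map (fun (i : Nat) => (i : Int))) [] 0 [] (by simpa using hvI)
    simp only [List.nil_append, List.length_nil, Nat.cast_zero] at hA
    rw [hA]
    have hB := bLoop_eq_loopA ws (vIdx ws) 0
      (by simp) (by simp) (vIdx_pairwise ws)
    simp only [List.drop_zero, Nat.cast_zero] at hB
    rw [hB]
  · have hany' : ws.any (fun p => p.1 == "v") = false := by
      cases h : ws.any (fun p => p.1 == "v")
      · rfl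
      · exact absurd h hany
    have hvI : vIdx ws = [] := (vIdx_eq_nil_iff ws).mpr hany'
    have hvs : ((PySem.List.enumerate ws 0).filter (fun p => p.2.1 == "v")).map (·.1) = [] := by
      rw [vIdx_enumerate ws 0, hvI]; rfl
    simp [hany, hvs]
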